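-- pv_equiv track=rewrite | github.com/chen-datong/Negativity2 | negativity_estimation.py | _total_sum_from_counts
-- ===== SOURCE A (Python) =====
-- import math
--
-- def _total_sum_from_counts(n_plus, n_minus, t):
--     """
--     Given counts arrays over b outcomes, compute:
--     total_sum = sum_b sum_{k=0..t} (-1)^k C(n_minus[b], k) C(n_plus[b], t-k)
--     Using exact integer comb (math.comb).
--     """
--     total_sum = 0
--     for b in range(len(n_plus)):
--         npb = int(n_plus[b])
--         nmb = int(n_minus[b])
--         if npb + nmb < t:
--             continue
--         sb = 0
--         for k in range(t + 1):
--             if k <= nmb and (t - k) <= npb: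
--                 sb += ((-1) ** k) * math.comb(nmb, k) * math.comb(npb, t - k)
--         total_sum += sb
--     return total_sum
-- ===== SOURCE B (Python) =====
-- import math
--
-- def _total_sum_from_counts(n_plus, n_minus, t):
--     """Per outcome the inner sum is the coefficient of x^t in (1+x)^p (1-x)^q.
--     Factor that polynomial as (1+x)^(p-q) (1-x^2)^q (or (1-x)^(q-p) (1-x^2)^p),
--     so the coefficient is a single short sum over j <= min(p, q, t//2):
--       eps * sum_j (-1)^j C(min(p,q), j) C(|p-q|, t-2j),  eps = (-1)^t if p < q else 1."""
--     total = 0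
--     for b in range(len(n_plus)):
--         p = int(n_plus[b])
--         q = int(n_minus[b])
--         if p < 0 or q < 0:
--             continue
--         m = min(p, q)
--         d = p - q if p >= q else q - p
--         sb = 0
--         for j in range(min(p, q, t // 2) + 1):
--             sb += (-1) ** j * math.comb(m, j) * math.comb(d, t - 2 * j)
--         if p < q and t % 2 == 1:
--             sb = -sb
--         total += sb
--     return total
-- ===== Notes on version B (the rewrite author's own statement) =====
-- stated objective: faster
-- what changed: B does not sum A's alternating convolution sum_{k<=t} (-1)^k C(q,k)C(p,t-k); it rewrites the per-outcome value as the coefficient of x^t in the factorization (1+x)^p(1-x)^q = (1+-x)^|p-q| (1-x^2)^min(p,q), giving a half-length sum over j <= t//2 with smaller binomials and an explicit sign (-1)^t when p < q.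
import Mathlib
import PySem

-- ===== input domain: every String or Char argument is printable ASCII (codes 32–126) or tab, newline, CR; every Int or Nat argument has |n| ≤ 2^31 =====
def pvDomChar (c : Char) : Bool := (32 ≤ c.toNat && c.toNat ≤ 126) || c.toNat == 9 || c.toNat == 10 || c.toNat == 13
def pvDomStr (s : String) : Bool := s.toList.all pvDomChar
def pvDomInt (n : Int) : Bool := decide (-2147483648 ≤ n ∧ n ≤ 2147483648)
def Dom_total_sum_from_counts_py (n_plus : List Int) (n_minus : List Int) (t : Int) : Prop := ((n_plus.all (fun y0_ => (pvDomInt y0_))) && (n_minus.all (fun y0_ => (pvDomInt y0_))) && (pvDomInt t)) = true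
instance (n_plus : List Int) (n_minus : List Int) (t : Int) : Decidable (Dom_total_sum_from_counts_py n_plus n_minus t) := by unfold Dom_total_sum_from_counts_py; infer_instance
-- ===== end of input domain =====

-- B replaces A's alternating convolution sum_{k=0..t} (-1)^k C(q,k) C(p,t-k) (the coefficient
-- of x^t in (1+x)^p (1-x)^q) by the half-length sum obtained from the factorization
-- (1+x)^p (1-x)^q = (1±x)^|p-q| (1-x^2)^min(p,q)  (objective: faster, a shorter sum with
-- smaller binomials; return value only — neither version mutates its arguments).

-- math.comb(n, k): both ports only call it with 0 ≤ n and 0 ≤ k; like math.comb it returns 0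
-- for k > n at once and otherwise evaluates the k-factor product n!/(k!(n-k)!)
def pyComb (n k : Int) : Int :=
  if n.toNat < k.toNat then 0 else ((n.toNat.descFactorial k.toNat) / k.toNat.factorial : Nat)

-- ===== PORT A =====
def total_sum_from_counts_py (n_plus : List Int) (n_minus : List Int) (t : Int) : Int :=
  (PySem.List.pyRange 0 (n_plus.length : Int) 1).foldl (fun total_sum b =>
    let npb := PySem.List.pyGetD n_plus b 0
    let nmb := PySem.List.pyGetD n_minus b 0
    if npb + nmb < t then total_sum
    else
      let sb := (PySem.List.pyRange 0 (t + 1) 1).foldl (fun sb k =>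
        if k ≤ nmb ∧ t - k ≤ npb then
          sb + (-1 : Int) ^ k.toNat * pyComb nmb k * pyComb npb (t - k)
        else sb) 0
      total_sum + sb) 0

-- ===== PORT B =====
def total_sum_from_counts_py_alt (n_plus : List Int) (n_minus : List Int) (t : Int) : Int :=
  (PySem.List.pyRange 0 (n_plus.length : Int) 1).foldl (fun total b =>
    let p := PySem.List.pyGetD n_plus b 0
    let q := PySem.List.pyGetD n_minus b 0
    if p < 0 ∨ q < 0 then total
    else
      let m := min p q
      let d := if p ≥ q then p - q else q - p
      let sb := (PySem.List.pyRange 0 (min (min p q) (PySem.Int.floordiv t 2) + 1) 1).foldl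
        (fun sb j => sb + (-1 : Int) ^ j.toNat * pyComb m j * pyComb d (t - 2 * j)) 0
      let sb := if p < q ∧ PySem.Int.mod t 2 = 1 then -sb else sb
      total + sb) 0

-- ===== PRECONDITION & SPEC =====
-- Pre_ excludes exactly the inputs where A raises IndexError (n_minus shorter than n_plus;
-- B raises the same IndexError there).
def Pre_total_sum_from_counts_py (n_plus : List Int) (n_minus : List Int) (t : Int) : Prop :=
  n_plus.length ≤ n_minus.length
instance (n_plus : List Int) (n_minus : List Int) (t : Int) : Decidable (Pre_total_sum_from_counts_py n_plus n_minus t) := by unfold Pre_total_sum_from_counts_py; infer_instance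

def pvWitness_total_sum_from_counts_py : List Int × List Int × Int := ([1, 2], [3, 4], 2)

def Spec_total_sum_from_counts_py (n_plus : List Int) (n_minus : List Int) (t : Int) (out : Int) : Prop := out = total_sum_from_counts_py_alt n_plus n_minus t
instance (n_plus : List Int) (n_minus : List Int) (t : Int) (out : Int) : Decidable (Spec_total_sum_from_counts_py n_plus n_minus t out) := by unfold Spec_total_sum_from_counts_py; infer_instance

-- ===== CLAIM (what is proved, stated in full; the proofs are below) =====
def Claim_equal_total_sum_from_counts_py : Prop := ∀ (n_plus : List Int) (n_minus : List Int) (t : Int), Dom_total_sum_from_counts_py n_plus n_minus t → Pre_total_sum_from_counts_py n_plus n_minus t → Spec_total_sum_from_counts_py n_plus n_minus t (total_sum_from_counts_py n_plus n_minus t)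

-- ===== LEMMAS AND PROOFS =====

lemma pvComb_eq (n k : Int) : pyComb n k = (n.toNat.choose k.toNat : Int) := by
  unfold pyComb
  by_cases h : n.toNat < k.toNat
  · rw [if_pos h, Nat.choose_eq_zero_of_lt h]; simp
  · rw [if_neg h, Nat.choose_eq_descFactorial_div_factorial]

-- ---- the combinatorial identity behind B, via polynomial coefficients ----

lemma pvExpand (y : Polynomial ℤ) (n : ℕ) :
    (1 - y)^n = ∑ k ∈ Finset.range (n+1), Polynomial.C ((-1:ℤ)^k * n.choose k) * y^k := by
  rw [sub_eq_add_neg, add_comm, add_pow]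
  refine Finset.sum_congr rfl fun k _ => ?_
  rw [neg_pow]
  simp only [map_mul, map_pow, map_neg, map_one, map_natCast]
  ring

lemma pvCoeffOneSubXPow (n k : ℕ) :
    ((1 - Polynomial.X : Polynomial ℤ)^n).coeff k = (-1:ℤ)^k * n.choose k := by
  rw [pvExpand, Polynomial.finset_sum_coeff]
  simp only [Polynomial.coeff_C_mul, Polynomial.coeff_X_pow, mul_ite, mul_one, mul_zero]
  rw [Finset.sum_ite_eq (Finset.range (n+1)) k]
  by_cases h : k ≤ n
  · rw [if_pos (Finset.mem_range.2 (by omega))]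
  · rw [if_neg (by simp [Finset.mem_range]; omega), Nat.choose_eq_zero_of_lt (by omega)]
    simp

lemma pvCoeffA (P Q T : ℕ) :
    ((1 - Polynomial.X : Polynomial ℤ)^Q * (1 + Polynomial.X)^P).coeff T
      = ∑ k ∈ Finset.range (T+1), (-1:ℤ)^k * Q.choose k * P.choose (T-k) := by
  rw [Polynomial.coeff_mul, Finset.Nat.sum_antidiagonal_eq_sum_range_succ_mk]
  refine Finset.sum_congr rfl fun k hk => ?_
  rw [pvCoeffOneSubXPow, Polynomial.coeff_one_add_X_pow]

lemma pvCoeffB (f : Polynomial ℤ) (M T : ℕ) :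
    (f * (1 - Polynomial.X^2)^M).coeff T
      = ∑ j ∈ Finset.range (M+1),
          (-1:ℤ)^j * M.choose j * (if 2*j ≤ T then f.coeff (T - 2*j) else 0) := by
  rw [pvExpand, Finset.mul_sum, Polynomial.finset_sum_coeff]
  refine Finset.sum_congr rfl fun j hj => ?_
  have h1 : f * (Polynomial.C ((-1:ℤ)^j * (M.choose j : ℤ)) * (Polynomial.X^2)^j)
      = Polynomial.C ((-1:ℤ)^j * (M.choose j : ℤ)) * (f * Polynomial.X^(2*j)) := by
    rw [← pow_mul]; ring
  rw [h1, Polynomial.coeff_C_mul, Polynomial.coeff_mul_X_pow']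

lemma pvFactorP (D M : ℕ) :
    ((1 - Polynomial.X : Polynomial ℤ)^M * (1 + Polynomial.X)^(D+M))
      = (1 + Polynomial.X)^D * (1 - Polynomial.X^2)^M := by
  have h : (1 - Polynomial.X^2 : Polynomial ℤ) = (1 - Polynomial.X) * (1 + Polynomial.X) := by
    ring
  rw [pow_add, h, mul_pow]; ring

lemma pvFactorQ (D M : ℕ) :
    ((1 - Polynomial.X : Polynomial ℤ)^(D+M) * (1 + Polynomial.X)^M)
      = (1 - Polynomial.X)^D * (1 - Polynomial.X^2)^M := by
  have h : (1 - Polynomial.X^2 : Polynomial ℤ) = (1 - Polynomial.X) * (1 + Polynomial.X) := by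
    ring
  rw [pow_add, h, mul_pow]; ring

-- swap the summation range from range (M+1) to range (T/2+1): terms vanish outside both
lemma pvRangeSwap (M T : ℕ) (h : ℕ → ℤ) :
    ∑ j ∈ Finset.range (M+1), (-1:ℤ)^j * M.choose j * (if 2*j ≤ T then h j else 0)
      = ∑ j ∈ Finset.range (T/2+1), (-1:ℤ)^j * M.choose j * h j := by
  have hsub1 : Finset.range (M+1) ⊆ Finset.range (max M (T/2) + 1) := by
    intro x hx; simp [Finset.mem_range] at *; omega
  have hsub2 : Finset.range (T/2+1) ⊆ Finset.range (max M (T/2) + 1) := by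
    intro x hx; simp [Finset.mem_range] at *; omega
  have e1 : ∑ j ∈ Finset.range (M+1), (-1:ℤ)^j * M.choose j * (if 2*j ≤ T then h j else 0)
      = ∑ j ∈ Finset.range (max M (T/2) + 1), (-1:ℤ)^j * M.choose j * (if 2*j ≤ T then h j else 0) :=
    Finset.sum_subset hsub1 (fun j _ hj => by
      have hj' : ¬ j < M + 1 := fun hh => hj (Finset.mem_range.2 hh)
      rw [Nat.choose_eq_zero_of_lt (by omega)]; simp)
  have e2 : ∑ j ∈ Finset.range (T/2+1), (-1:ℤ)^j * M.choose j * (if 2*j ≤ T then h j else 0)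
      = ∑ j ∈ Finset.range (max M (T/2) + 1), (-1:ℤ)^j * M.choose j * (if 2*j ≤ T then h j else 0) :=
    Finset.sum_subset hsub2 (fun j _ hj => by
      have hj' : ¬ j < T/2 + 1 := fun hh => hj (Finset.mem_range.2 hh)
      rw [if_neg (by omega), mul_zero])
  rw [e1, ← e2]
  refine Finset.sum_congr rfl fun j hj => ?_
  have hj' : j < T/2 + 1 := Finset.mem_range.1 hj
  rw [if_pos (by omega)]

-- the key identity: A's alternating convolution equals B's factored half-length sum
lemma pvKey (P Q T : ℕ) :
    ∑ k ∈ Finset.range (T+1), (-1:ℤ)^k * Q.choose k * P.choose (T-k)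
      = (if P < Q ∧ T % 2 = 1 then (-1:ℤ) else 1)
        * ∑ j ∈ Finset.range (T/2+1),
            (-1:ℤ)^j * (min P Q).choose j * ((if Q ≤ P then P - Q else Q - P)).choose (T - 2*j) := by
  by_cases hpq : Q ≤ P
  · have hD : P = (P - Q) + Q := by omega
    rw [if_neg (by omega), if_pos hpq, min_eq_right hpq, one_mul, ← pvCoeffA P Q T]
    rw [show ((1 - Polynomial.X : Polynomial ℤ)^Q * (1 + Polynomial.X)^P)
          = (1 + Polynomial.X)^(P-Q) * (1 - Polynomial.X^2)^Q by
        conv_lhs => rw [hD]; rw [pvFactorP]]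
    rw [pvCoeffB]
    rw [pvRangeSwap Q T (fun j => ((1 + Polynomial.X : Polynomial ℤ)^(P-Q)).coeff (T - 2*j))]
    refine Finset.sum_congr rfl fun j _ => ?_
    rw [Polynomial.coeff_one_add_X_pow]
  · have hD : Q = (Q - P) + P := by omega
    rw [if_neg hpq, min_eq_left (by omega), ← pvCoeffA P Q T]
    rw [show ((1 - Polynomial.X : Polynomial ℤ)^Q * (1 + Polynomial.X)^P)
          = (1 - Polynomial.X)^(Q-P) * (1 - Polynomial.X^2)^P by
        conv_lhs => rw [hD]; rw [pvFactorQ]]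
    rw [pvCoeffB]
    rw [pvRangeSwap P T (fun j => ((1 - Polynomial.X : Polynomial ℤ)^(Q-P)).coeff (T - 2*j))]
    have hsign : (if P < Q ∧ T % 2 = 1 then (-1:ℤ) else 1) = (-1:ℤ)^T := by
      by_cases ht : T % 2 = 1
      · rw [if_pos ⟨by omega, ht⟩, (Nat.odd_iff.2 ht).neg_one_pow]
      · rw [if_neg (by tauto), (Nat.even_iff.2 (by omega)).neg_one_pow]
    rw [hsign, Finset.mul_sum]
    refine Finset.sum_congr rfl fun j hj => ?_
    rw [pvCoeffOneSubXPow]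
    have h2j : 2*j ≤ T := by have := Finset.mem_range.1 hj; omega
    have hT : (-1:ℤ)^(T - 2*j) = (-1:ℤ)^T := by
      have e : T - 2*j + 2*j = T := by omega
      calc (-1:ℤ)^(T - 2*j) = (-1:ℤ)^(T - 2*j) * ((-1:ℤ)^2)^j := by norm_num
        _ = (-1:ℤ)^(T - 2*j + 2*j) := by rw [← pow_mul, ← pow_add]
        _ = (-1:ℤ)^T := by rw [e]
    rw [hT]
    ring

-- A's sum vanishes when t > p + q (the guard A tests; B has no such guard)
lemma pvVanishA (P Q T : ℕ) (h : P + Q < T) :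
    ∑ k ∈ Finset.range (T+1), (-1:ℤ)^k * Q.choose k * P.choose (T-k) = 0 := by
  refine Finset.sum_eq_zero fun k _ => ?_
  by_cases hk : k ≤ Q
  · rw [Nat.choose_eq_zero_of_lt (show P < T - k by omega), Nat.cast_zero, mul_zero]
  · rw [Nat.choose_eq_zero_of_lt (by omega), Nat.cast_zero, mul_zero, zero_mul]

-- ---- loop-shape lemmas ----

-- a guarded accumulating loop whose guard never fires leaves the accumulator unchanged
lemma pvFoldlNone {α : Type} (c : α → Prop) [DecidablePred c] (g : α → Int) :
    ∀ (l : List α) (a : Int), (∀ x ∈ l, ¬ c x) →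
      l.foldl (fun s x => if c x then s + g x else s) a = a := by
  intro l
  induction l with
  | nil => intro a _; rfl
  | cons x xs ih =>
    intro a h
    rw [List.foldl_cons, if_neg (h x (List.mem_cons_self))]
    exact ih a fun y hy => h y (List.mem_cons_of_mem x hy)

-- a guarded accumulating loop whose term vanishes where the guard is false is a plain sum
lemma pvFoldlGuard {α : Type} (c : α → Prop) [DecidablePred c] (g : α → Int) :
    ∀ (l : List α) (a : Int), (∀ x ∈ l, ¬ c x → g x = 0) →
      l.foldl (fun s x => if c x then s + g x else s) a = a + (l.map g).sum := by
  intro l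
  induction l with
  | nil => intro a _; simp
  | cons x xs ih =>
    intro a h
    rw [List.foldl_cons, List.map_cons, List.sum_cons]
    have hrest : ∀ y ∈ xs, ¬ c y → g y = 0 := fun y hy => h y (List.mem_cons_of_mem x hy)
    by_cases hc : c x
    · rw [if_pos hc, ih (a + g x) hrest]; ring
    · rw [if_neg hc, h x (List.mem_cons_self) hc, ih a hrest]; ring

lemma pvSumMapRange (g : ℕ → ℤ) (n : ℕ) :
    ((List.range n).map g).sum = ∑ i ∈ Finset.range n, g i := by
  induction n with
  | zero => simp
  | succ n ih => rw [List.range_succ, Finset.sum_range_succ, List.map_append, List.sum_append, ih]; simp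

-- ---- evaluating the two inner loops, nonnegative case ----

lemma pvInnerA (P Q T : ℕ) :
    (PySem.List.pyRange 0 ((T : Int) + 1) 1).foldl (fun sb k =>
        if k ≤ (Q : Int) ∧ (T : Int) - k ≤ (P : Int) then
          sb + (-1 : Int) ^ k.toNat * pyComb (Q : Int) k * pyComb (P : Int) ((T : Int) - k)
        else sb) 0
      = ∑ k ∈ Finset.range (T+1), (-1:ℤ)^k * Q.choose k * P.choose (T-k) := by
  rw [show ((T : Int) + 1) = ((T + 1 : ℕ) : Int) by push_cast; ring]
  rw [PySem.List.pyRange_zero_natCast, List.foldl_map]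
  have hh := pvFoldlGuard (fun k : ℕ => ((k : Int) ≤ (Q : Int) ∧ (T : Int) - (k : Int) ≤ (P : Int)))
      (fun k : ℕ => (-1 : Int) ^ ((k : Int)).toNat * pyComb (Q : Int) (k : Int)
          * pyComb (P : Int) ((T : Int) - (k : Int)))
      (List.range (T+1)) 0 (by
        intro k hk hc
        have hkT : k < T + 1 := List.mem_range.1 hk
        simp only [not_and_or, not_le] at hc
        rcases hc with hc | hc
        · have hQk : Q < k := by exact_mod_cast hc
          simp [pvComb_eq, Nat.choose_eq_zero_of_lt hQk]
        · have h2 : ((T : Int) - (k : Int)).toNat = T - k := by omega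
          have h3 : P < T - k := by omega
          simp [pvComb_eq, h2, Nat.choose_eq_zero_of_lt h3])
  rw [hh]
  rw [zero_add, pvSumMapRange]
  refine Finset.sum_congr rfl fun k hk => ?_
  have hkT : k < T + 1 := Finset.mem_range.1 hk
  have h2 : ((T : Int) - (k : Int)).toNat = T - k := by omega
  simp [pvComb_eq, h2]

lemma pvInnerB (P Q T : ℕ) :
    (PySem.List.pyRange 0 (min (min (P:Int) (Q:Int)) (PySem.Int.floordiv (T : Int) 2) + 1) 1).foldl
      (fun sb j => sb + (-1 : Int) ^ j.toNat * pyComb (min (P : Int) (Q : Int)) j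
        * pyComb (if (P : Int) ≥ (Q : Int) then (P : Int) - (Q : Int) else (Q : Int) - (P : Int))
            ((T : Int) - 2 * j)) 0
      = ∑ j ∈ Finset.range (T/2+1),
          (-1:ℤ)^j * (min P Q).choose j * ((if Q ≤ P then P - Q else Q - P)).choose (T - 2*j) := by
  have hfd : PySem.Int.floordiv (T : Int) 2 = ((T / 2 : ℕ) : Int) := by
    exact_mod_cast PySem.Int.floordiv_natCast T 2
  rw [show (min (min (P:Int) (Q:Int)) (PySem.Int.floordiv (T:Int) 2) + 1)
        = ((min (min P Q) (T/2) + 1 : ℕ) : Int) by rw [hfd]; push_cast; omega]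
  rw [PySem.List.pyRange_zero_natCast, List.foldl_map, PySem.List.foldl_add, zero_add,
    pvSumMapRange]
  have step1 : ∀ j ∈ Finset.range (min (min P Q) (T/2) + 1),
      (-1 : Int) ^ ((j : Int)).toNat * pyComb (min (P : Int) (Q : Int)) (j : Int)
        * pyComb (if (P : Int) ≥ (Q : Int) then (P : Int) - (Q : Int) else (Q : Int) - (P : Int))
            ((T : Int) - 2 * (j : Int))
      = (-1:ℤ)^j * (min P Q).choose j * ((if Q ≤ P then P - Q else Q - P)).choose (T - 2*j) := by
    intro j hj
    have hjH : j < min (min P Q) (T/2) + 1 := Finset.mem_range.1 hj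
    by_cases hpq : Q ≤ P
    · rw [if_pos (show (P:Int) ≥ (Q:Int) by exact_mod_cast hpq), if_pos hpq]
      simp only [pvComb_eq, Int.toNat_natCast]
      rw [show (min (P:Int) (Q:Int)).toNat = min P Q from by omega,
          show ((P:Int) - (Q:Int)).toNat = P - Q from by omega,
          show ((T:Int) - 2*(j:Int)).toNat = T - 2*j from by omega]
    · rw [if_neg (show ¬ ((P:Int) ≥ (Q:Int)) by exact_mod_cast hpq), if_neg hpq]
      simp only [pvComb_eq, Int.toNat_natCast]
      rw [show (min (P:Int) (Q:Int)).toNat = min P Q from by omega,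
          show ((Q:Int) - (P:Int)).toNat = Q - P from by omega,
          show ((T:Int) - 2*(j:Int)).toNat = T - 2*j from by omega]
  rw [Finset.sum_congr rfl step1]
  refine Finset.sum_subset
    (show Finset.range (min (min P Q) (T/2) + 1) ⊆ Finset.range (T/2 + 1) by
      intro x hx; simp [Finset.mem_range] at *; omega)
    fun j hjT hjH => ?_
  have h1 : j < T/2 + 1 := Finset.mem_range.1 hjT
  have h2 : ¬ j < min (min P Q) (T/2) + 1 := fun hh => hjH (Finset.mem_range.2 hh)
  rw [Nat.choose_eq_zero_of_lt (show min P Q < j by omega)]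
  simp

-- ---- the per-outcome contribution, all integer cases ----

lemma pvContrib (p q t : Int) :
    (if p + q < t then (0:Int)
     else (PySem.List.pyRange 0 (t + 1) 1).foldl (fun sb k =>
       if k ≤ q ∧ t - k ≤ p then sb + (-1 : Int) ^ k.toNat * pyComb q k * pyComb p (t - k)
       else sb) 0)
    = (if p < 0 ∨ q < 0 then (0:Int)
       else (if p < q ∧ PySem.Int.mod t 2 = 1 then
           -((PySem.List.pyRange 0 (min (min p q) (PySem.Int.floordiv t 2) + 1) 1).foldl (fun sb j =>
             sb + (-1 : Int) ^ j.toNat * pyComb (min p q) j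
               * pyComb (if p ≥ q then p - q else q - p) (t - 2 * j)) 0)
         else
           (PySem.List.pyRange 0 (min (min p q) (PySem.Int.floordiv t 2) + 1) 1).foldl (fun sb j =>
             sb + (-1 : Int) ^ j.toNat * pyComb (min p q) j
               * pyComb (if p ≥ q then p - q else q - p) (t - 2 * j)) 0)) := by
  by_cases hneg : p < 0 ∨ q < 0
  · -- A's inner loop adds nothing: every k in range(t+1) has 0 ≤ k ≤ t, so k ≤ q fails
    -- when q < 0 and t - k ≤ p fails when p < 0
    rw [if_pos hneg]
    have hz : (PySem.List.pyRange 0 (t + 1) 1).foldl (fun sb k =>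
        if k ≤ q ∧ t - k ≤ p then sb + (-1 : Int) ^ k.toNat * pyComb q k * pyComb p (t - k)
        else sb) 0 = 0 := by
      refine pvFoldlNone _ _ _ 0 fun k hk => ?_
      have hmem := (PySem.List.mem_pyRange_one).1 hk
      rcases hneg with h | h
      · rintro ⟨_, h2⟩; omega
      · rintro ⟨h1, _⟩; omega
    rw [hz]
    split <;> rfl
  · push_neg at hneg
    obtain ⟨hp, hq⟩ := hneg
    rw [if_neg (show ¬ (p < 0 ∨ q < 0) by omega)]
    by_cases ht : t < 0
    · -- both loops are empty
      rw [PySem.List.pyRange_one_eq_nil (by omega : t + 1 ≤ 0)]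
      rw [PySem.List.pyRange_one_eq_nil (show min (min p q) (PySem.Int.floordiv t 2) + 1 ≤ 0 by
        rw [PySem.Int.floordiv_eq_ediv_of_pos (by norm_num : (0:Int) < 2)]; omega)]
      simp only [List.foldl_nil, neg_zero, ite_self]
    · obtain ⟨P, rfl⟩ : ∃ P : ℕ, p = (P : Int) := ⟨p.toNat, by omega⟩
      obtain ⟨Q, rfl⟩ : ∃ Q : ℕ, q = (Q : Int) := ⟨q.toNat, by omega⟩
      obtain ⟨T, rfl⟩ : ∃ T : ℕ, t = (T : Int) := ⟨t.toNat, by omega⟩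
      rw [pvInnerA, pvInnerB]
      have hcond : ((P:Int) < (Q:Int) ∧ PySem.Int.mod (T:Int) 2 = 1) ↔ (P < Q ∧ T % 2 = 1) := by
        have hmd : PySem.Int.mod (T:Int) 2 = ((T % 2 : ℕ) : Int) := by
          exact_mod_cast PySem.Int.mod_natCast T 2
        rw [hmd]
        constructor
        · rintro ⟨h1, h2⟩; exact ⟨by exact_mod_cast h1, by exact_mod_cast h2⟩
        · rintro ⟨h1, h2⟩; exact ⟨by exact_mod_cast h1, by exact_mod_cast h2⟩
      by_cases hg : (P:Int) + (Q:Int) < (T:Int)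
      · rw [if_pos hg]
        have hPQ : P + Q < T := by exact_mod_cast hg
        have hz := pvVanishA P Q T hPQ
        rw [pvKey] at hz
        have hε : (if P < Q ∧ T % 2 = 1 then (-1:ℤ) else 1) ≠ 0 := by split <;> norm_num
        have hSB := (mul_eq_zero.1 hz).resolve_left hε
        by_cases hc : (P:Int) < (Q:Int) ∧ PySem.Int.mod (T:Int) 2 = 1
        · rw [if_pos hc, hSB]; ring
        · rw [if_neg hc, hSB]
      · rw [if_neg hg, pvKey]
        by_cases hc : P < Q ∧ T % 2 = 1
        · rw [if_pos (hcond.2 hc), if_pos hc]; ring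
        · rw [if_neg (fun hh => hc (hcond.1 hh)), if_neg hc, one_mul]

-- ===== VERDICT (by name: the statement is the Claim_ definition above) =====
theorem total_sum_from_counts_py_spec : Claim_equal_total_sum_from_counts_py := by
  intro n_plus n_minus t _ _
  unfold Spec_total_sum_from_counts_py total_sum_from_counts_py total_sum_from_counts_py_alt
  have hstep : (fun (total_sum : Int) (b : Int) =>
      let npb := PySem.List.pyGetD n_plus b 0
      let nmb := PySem.List.pyGetD n_minus b 0
      if npb + nmb < t then total_sum
      else
        let sb := (PySem.List.pyRange 0 (t + 1) 1).foldl (fun sb k =>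
          if k ≤ nmb ∧ t - k ≤ npb then
            sb + (-1 : Int) ^ k.toNat * pyComb nmb k * pyComb npb (t - k)
          else sb) 0
        total_sum + sb)
      = (fun (total : Int) (b : Int) =>
      let p := PySem.List.pyGetD n_plus b 0
      let q := PySem.List.pyGetD n_minus b 0
      if p < 0 ∨ q < 0 then total
      else
        let m := min p q
        let d := if p ≥ q then p - q else q - p
        let sb := (PySem.List.pyRange 0 (min (min p q) (PySem.Int.floordiv t 2) + 1) 1).foldl (fun sb j =>
          sb + (-1 : Int) ^ j.toNat * pyComb m j * pyComb d (t - 2 * j)) 0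
        let sb := if p < q ∧ PySem.Int.mod t 2 = 1 then -sb else sb
        total + sb) := by
    funext tot b
    show (if PySem.List.pyGetD n_plus b 0 + PySem.List.pyGetD n_minus b 0 < t then tot
      else tot + (PySem.List.pyRange 0 (t + 1) 1).foldl (fun sb k =>
        if k ≤ PySem.List.pyGetD n_minus b 0 ∧ t - k ≤ PySem.List.pyGetD n_plus b 0 then
          sb + (-1 : Int) ^ k.toNat * pyComb (PySem.List.pyGetD n_minus b 0) k * pyComb (PySem.List.pyGetD n_plus b 0) (t - k)
        else sb) 0)
      = (if PySem.List.pyGetD n_plus b 0 < 0 ∨ PySem.List.pyGetD n_minus b 0 < 0 then tot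
      else tot + (if PySem.List.pyGetD n_plus b 0 < PySem.List.pyGetD n_minus b 0 ∧ PySem.Int.mod t 2 = 1 then
          -((PySem.List.pyRange 0 (min (min (PySem.List.pyGetD n_plus b 0) (PySem.List.pyGetD n_minus b 0)) (PySem.Int.floordiv t 2) + 1) 1).foldl (fun sb j =>
            sb + (-1 : Int) ^ j.toNat * pyComb (min (PySem.List.pyGetD n_plus b 0) (PySem.List.pyGetD n_minus b 0)) j
              * pyComb (if PySem.List.pyGetD n_plus b 0 ≥ PySem.List.pyGetD n_minus b 0 then PySem.List.pyGetD n_plus b 0 - PySem.List.pyGetD n_minus b 0 else PySem.List.pyGetD n_minus b 0 - PySem.List.pyGetD n_plus b 0) (t - 2 * j)) 0)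
        else
          (PySem.List.pyRange 0 (min (min (PySem.List.pyGetD n_plus b 0) (PySem.List.pyGetD n_minus b 0)) (PySem.Int.floordiv t 2) + 1) 1).foldl (fun sb j =>
            sb + (-1 : Int) ^ j.toNat * pyComb (min (PySem.List.pyGetD n_plus b 0) (PySem.List.pyGetD n_minus b 0)) j
              * pyComb (if PySem.List.pyGetD n_plus b 0 ≥ PySem.List.pyGetD n_minus b 0 then PySem.List.pyGetD n_plus b 0 - PySem.List.pyGetD n_minus b 0 else PySem.List.pyGetD n_minus b 0 - PySem.List.pyGetD n_plus b 0) (t - 2 * j)) 0))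
    generalize PySem.List.pyGetD n_plus b 0 = p
    generalize PySem.List.pyGetD n_minus b 0 = q
    have h := pvContrib p q t
    split_ifs at h ⊢ <;> omega
  rw [hstep]
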